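-- pv_equiv track=rewrite | github.com/hyjcde/PVcountingLLM | smart_pv_detection.py | _cluster_lines
-- ===== SOURCE A (Python) =====
-- from typing import Any, Dict, List, Tuple
--
-- def _cluster_lines(lines: List[int], tolerance: int = 30) -> List[int]:
--     """聚类相近的线条"""
--     if not lines:
--         return []
--
--     clustered = []
--     current_cluster = [lines[0]]
--
--     for i in range(1, len(lines)):
--         if lines[i] - current_cluster[-1] <= tolerance:
--             current_cluster.append(lines[i])
--         else:
--             center = sum(current_cluster) // len(current_cluster)
--             clustered.append(center)
--             current_cluster = [lines[i]]
--
--     if current_cluster: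
--         center = sum(current_cluster) // len(current_cluster)
--         clustered.append(center)
--
--     return clustered
-- ===== SOURCE B (Python) =====
-- def _cluster_lines(lines, tolerance=30):
--     """Staged passes: (1) collect gap boundary indices, (2) build prefix sums,
--     (3) emit each segment's floor-mean from prefix-sum differences."""
--     if not lines:
--         return []
--     n = len(lines)
--     gaps = [i + 1 for i, (p, q) in enumerate(zip(lines, lines[1:])) if q - p > tolerance]
--     bounds = [0] + gaps + [n]
--     prefix = [0]
--     for x in lines:
--         prefix.append(prefix[-1] + x)
--     return [(prefix[b] - prefix[a]) // (b - a) for a, b in zip(bounds, bounds[1:])]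
-- ===== Notes on version B (the rewrite author's own statement) =====
-- stated objective: alternative
-- what changed: A grows a current-cluster list in one element-wise loop, emitting a mean at each gap; B instead runs staged passes: it first collects the gap boundary indices, then builds a prefix-sum array, and finally computes every segment's floor-mean from prefix-sum differences over consecutive boundary pairs.
import Mathlib
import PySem

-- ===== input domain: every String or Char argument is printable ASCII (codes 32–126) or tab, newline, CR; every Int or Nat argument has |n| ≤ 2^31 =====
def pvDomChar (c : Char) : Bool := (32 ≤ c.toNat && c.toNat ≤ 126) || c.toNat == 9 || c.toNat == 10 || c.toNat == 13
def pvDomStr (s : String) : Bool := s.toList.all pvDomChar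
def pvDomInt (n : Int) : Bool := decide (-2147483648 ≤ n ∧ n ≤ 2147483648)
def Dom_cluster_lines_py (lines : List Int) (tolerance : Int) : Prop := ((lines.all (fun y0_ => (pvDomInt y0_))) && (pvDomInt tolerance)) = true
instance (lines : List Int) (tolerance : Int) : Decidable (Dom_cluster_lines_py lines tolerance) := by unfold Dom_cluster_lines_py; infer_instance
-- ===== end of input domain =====

-- B replaces A's accumulating current-cluster loop by staged passes: gap boundary
-- indices first, then a prefix-sum list, then segment means from prefix differences
-- over consecutive boundary pairs (objective: alternative).

-- ===== PORT A =====
-- center = sum(cluster) // len(cluster)  (Python floor division)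
def pvCenter (c : List Int) : Int := PySem.Int.floordiv c.sum (c.length : Int)

-- A's for-loop over lines[1:], state (clustered, current_cluster); cur[-1] via getLast!
def pvLoopA (tolerance : Int) : List Int → List Int → List Int → List Int × List Int
  | clustered, cur, [] => (clustered, cur)
  | clustered, cur, x :: xs =>
    if x - cur.getLast! ≤ tolerance then pvLoopA tolerance clustered (cur ++ [x]) xs
    else pvLoopA tolerance (clustered ++ [pvCenter cur]) [x] xs

def cluster_lines_py (lines : List Int) (tolerance : Int) : List Int :=
  match lines with
  | [] => []
  | l0 :: rest =>
    let s := pvLoopA tolerance [] [l0] rest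
    if s.2.isEmpty then s.1 else s.1 ++ [pvCenter s.2]

-- ===== PORT B =====
-- Source B line by line: gaps comprehension over enumerate(zip(lines, lines[1:])),
-- bounds = [0] + gaps + [n], prefix sums built by the for-loop, then the final
-- comprehension over zip(bounds, bounds[1:]) of (prefix[b]-prefix[a]) // (b-a).
def cluster_lines_py_alt (lines : List Int) (tolerance : Int) : List Int :=
  if lines = [] then []
  else
    let n : Int := (lines.length : Int)
    let gaps : List Int :=
      ((PySem.List.enumerate (lines.zip (PySem.List.slice lines (some 1) none)) 0).filter
        (fun p => decide (p.2.2 - p.2.1 > tolerance))).map (fun p => p.1 + 1)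
    let bounds : List Int := 0 :: (gaps ++ [n])
    let prefx : List Int := lines.foldl (fun p x => p ++ [p.getLast! + x]) [0]
    (bounds.zip (PySem.List.slice bounds (some 1) none)).map
      (fun ab => PySem.Int.floordiv
        (PySem.List.pyGetD prefx ab.2 0 - PySem.List.pyGetD prefx ab.1 0) (ab.2 - ab.1))

-- ===== PRECONDITION & SPEC =====
def Spec_cluster_lines_py (lines : List Int) (tolerance : Int) (out : List Int) : Prop := out = cluster_lines_py_alt lines tolerance
instance (lines : List Int) (tolerance : Int) (out : List Int) : Decidable (Spec_cluster_lines_py lines tolerance out) := by unfold Spec_cluster_lines_py; infer_instance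

-- ===== CLAIM =====
def Claim_equal_cluster_lines_py : Prop := ∀ (lines : List Int) (tolerance : Int), Dom_cluster_lines_py lines tolerance → Spec_cluster_lines_py lines tolerance (cluster_lines_py lines tolerance)

-- ===== LEMMAS AND PROOFS =====

-- steps taken while lines[i] - lines[i-1] <= tolerance (length-1 of the first cluster)
def pvSpan (tolerance prev : Int) : List Int → Nat
  | [] => 0
  | x :: xs => if x - prev ≤ tolerance then pvSpan tolerance x xs + 1 else 0

-- clean segment-by-segment recursion, the common reference point of both ports
def pvSegRec (lines : List Int) (tolerance : Int) : List Int :=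
  match lines with
  | [] => []
  | l0 :: rest =>
    let i := pvSpan tolerance l0 rest + 1
    PySem.Int.floordiv ((l0 :: rest).take i).sum (i : Int)
      :: pvSegRec ((l0 :: rest).drop i) tolerance
termination_by lines.length
decreasing_by simp

-- gap boundary indices of l, offset k: j ∈ list iff l[j]-l[j-1] > tolerance (rel. to k)
def pvGapsN (t : Int) (k : Nat) : List Int → List Nat
  | p :: q :: xs => if q - p > t then (k+1) :: pvGapsN t (k+1) (q :: xs) else pvGapsN t (k+1) (q :: xs)
  | _ => []

-- running sums with start s
def pvScan (s : Int) : List Int → List Int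
  | [] => []
  | x :: xs => (s + x) :: pvScan (s + x) xs

-- Nat-level form of B's result: bounds, zipped with their tail, mapped to floor-means
def pvCenters (t : Int) (l : List Int) : List Int :=
  ((0 :: (pvGapsN t 0 l ++ [l.length])).zip (pvGapsN t 0 l ++ [l.length])).map
    (fun ab => PySem.Int.floordiv ((l.take ab.2).sum - (l.take ab.1).sum) ((ab.2 : Int) - (ab.1 : Int)))

lemma getLast!_cons_eq (c0 c : Int) (cs : List Int) :
    (c0 :: c :: cs).getLast! = (c :: cs).getLast! := by simp

lemma getLast?_eq_some_getLast! (c0 : Int) (cs : List Int) :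
    (c0 :: cs).getLast? = some ((c0 :: cs).getLast!) := by
  induction cs generalizing c0 with
  | nil => simp
  | cons c cs' ih => simpa using ih c

-- pvSpan walks through a whole tolerance-chain, then continues from its last element
lemma pvSpan_chain_append (tol : Int) : ∀ (cs : List Int) (c0 : Int) (rest : List Int),
    List.IsChain (fun a b => b - a ≤ tol) (c0 :: cs) →
    pvSpan tol c0 (cs ++ rest) = cs.length + pvSpan tol ((c0 :: cs).getLast!) rest := by
  intro cs
  induction cs with
  | nil => intro c0 rest _; simp
  | cons c cs' ih =>
    intro c0 rest hch
    rw [List.isChain_cons] at hch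
    have h1 : c - c0 ≤ tol := hch.1 c (by simp)
    have h2 := ih c rest hch.2
    simp only [List.cons_append, pvSpan, if_pos h1, getLast!_cons_eq, h2, List.length_cons]
    omega

-- pvSegRec on a chain `cur` followed by a `rest` it does not continue into
lemma segRec_of_chain_gap (tol : Int) (cur rest : List Int) (hne : cur ≠ [])
    (hch : List.IsChain (fun a b => b - a ≤ tol) cur)
    (hgap : pvSpan tol cur.getLast! rest = 0) :
    pvSegRec (cur ++ rest) tol = pvCenter cur :: pvSegRec rest tol := by
  obtain ⟨c0, cs, rfl⟩ := List.exists_cons_of_ne_nil hne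
  simp only [List.cons_append]
  rw [pvSegRec, pvSpan_chain_append tol cs c0 rest hch, hgap]
  have hlen : cs.length + 0 + 1 = (c0 :: cs).length := by simp
  rw [hlen]
  have h1 : ((c0 :: cs) ++ rest).take (c0 :: cs).length = c0 :: cs := List.take_left' rfl
  have h2 : ((c0 :: cs) ++ rest).drop (c0 :: cs).length = rest := List.drop_left' rfl
  simp only [List.cons_append] at h1 h2
  rw [h1, h2]
  rfl

-- the loop invariant: finishing A's loop equals acc ++ pvSegRec on (open cluster ++ rest)
lemma loopA_spec (tol : Int) : ∀ (rest cur acc : List Int), cur ≠ [] →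
    List.IsChain (fun a b => b - a ≤ tol) cur →
    (let s := pvLoopA tol acc cur rest
     if s.2.isEmpty then s.1 else s.1 ++ [pvCenter s.2])
      = acc ++ pvSegRec (cur ++ rest) tol := by
  intro rest
  induction rest with
  | nil =>
    intro cur acc hne hch
    have h := segRec_of_chain_gap tol cur [] hne hch (by simp [pvSpan])
    simp only [pvLoopA, List.append_nil] at *
    rw [h, pvSegRec]
    simp [List.isEmpty_iff, hne]
  | cons x xs ih =>
    intro cur acc hne hch
    simp only [pvLoopA]
    by_cases h : x - cur.getLast! ≤ tol
    · rw [if_pos h]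
      obtain ⟨c0, cs, rfl⟩ := List.exists_cons_of_ne_nil hne
      have hch' : List.IsChain (fun a b => b - a ≤ tol) ((c0 :: cs) ++ [x]) := by
        refine hch.append (List.isChain_singleton x) ?_
        intro a ha y hy
        rw [getLast?_eq_some_getLast!] at ha
        simp at ha hy
        subst ha; subst hy
        exact h
      have := ih ((c0 :: cs) ++ [x]) acc (by simp) hch'
      simpa [List.append_assoc] using this
    · rw [if_neg h]
      have hgap : pvSpan tol cur.getLast! (x :: xs) = 0 := by
        simp only [pvSpan]; rw [if_neg h]
      have := ih [x] (acc ++ [pvCenter cur]) (by simp) (List.isChain_singleton x)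
      rw [this, segRec_of_chain_gap tol cur (x :: xs) hne hch hgap]
      simp

-- A equals the segment recursion
lemma a_eq_segRec (lines : List Int) (tol : Int) :
    cluster_lines_py lines tol = pvSegRec lines tol := by
  cases lines with
  | nil => rw [pvSegRec]; rfl
  | cons l0 rest =>
    have := loopA_spec tol rest [l0] [] (by simp) (List.isChain_singleton l0)
    simpa [cluster_lines_py] using this

-- ----- B side -----

-- the enumerate/zip/filter/map comprehension computes pvGapsN (cast to Int)
lemma gaps_bridge (t : Int) : ∀ (xs : List Int) (p : Int) (k : Nat),
    ((PySem.List.enumerate ((p :: xs).zip xs) (k : Int)).filter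
        (fun q => decide (q.2.2 - q.2.1 > t))).map (fun q => q.1 + 1)
      = (pvGapsN t k (p :: xs)).map (fun j : Nat => (j : Int)) := by
  intro xs
  induction xs with
  | nil => intro p k; simp [pvGapsN, PySem.List.enumerate_nil]
  | cons q ys ih =>
    intro p k
    have hc : ((k : Int) + 1) = (((k + 1 : Nat)) : Int) := by push_cast; ring
    have hz : (p :: q :: ys).zip (q :: ys) = (p, q) :: (q :: ys).zip ys := rfl
    rw [hz, PySem.List.enumerate_cons, hc]
    by_cases hgt : q - p > t
    · rw [List.filter_cons, if_pos (by simpa using hgt), List.map_cons, ih q (k + 1)]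
      have he : pvGapsN t k (p :: q :: ys) = (k + 1) :: pvGapsN t (k + 1) (q :: ys) := by
        simp only [pvGapsN, if_pos hgt]
      rw [he, List.map_cons]
      simp
    · rw [List.filter_cons, if_neg (by simpa using hgt)]
      simp only [ih q (k + 1), pvGapsN, if_neg hgt]

-- offset shift of pvGapsN
lemma gapsN_shift_aux (t : Int) : ∀ (l : List Int) (k j : Nat),
    pvGapsN t (k + j) l = (pvGapsN t j l).map (· + k) := by
  intro l
  induction l with
  | nil => intro k j; simp [pvGapsN]
  | cons p l' ih =>
    intro k j
    cases l' with
    | nil => simp [pvGapsN]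
    | cons q xs =>
      by_cases hgt : q - p > t
      · simp only [pvGapsN, if_pos hgt]
        simp only [List.map_cons]
        congr 1
        · omega
        · rw [show k + j + 1 = k + (j + 1) by omega]; exact ih k (j + 1)
      · simp only [pvGapsN, if_neg hgt]
        have h := ih k (j + 1)
        rw [show k + j + 1 = k + (j + 1) by omega, h]

lemma gapsN_shift (t : Int) (l : List Int) (k : Nat) :
    pvGapsN t k l = (pvGapsN t 0 l).map (· + k) := by
  have := gapsN_shift_aux t l k 0
  simpa using this

-- members of pvGapsN t 0 l are at most l.length
lemma gapsN_mem_le (t : Int) : ∀ (l : List Int) (k j : Nat),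
    j ∈ pvGapsN t k l → j ≤ k + l.length := by
  intro l
  induction l with
  | nil => intro k j h; simp [pvGapsN] at h
  | cons p l' ih =>
    intro k j h
    cases l' with
    | nil => simp [pvGapsN] at h
    | cons q xs =>
      by_cases hgt : q - p > t
      · simp only [pvGapsN, if_pos hgt, List.mem_cons] at h
        rcases h with rfl | h
        · simp only [List.length_cons]; omega
        · have := ih (k + 1) j h
          simp only [List.length_cons] at this ⊢; omega
      · simp only [pvGapsN, if_neg hgt] at h
        have := ih (k + 1) j h
        simp at this ⊢; omega

-- pvSpan is at most the list length
lemma pvSpan_le (t : Int) : ∀ (l : List Int) (p : Int), pvSpan t p l ≤ l.length := by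
  intro l
  induction l with
  | nil => intro p; simp [pvSpan]
  | cons x xs ih =>
    intro p
    simp only [pvSpan]
    split
    · have := ih x; simp; omega
    · simp

-- pvGapsN decomposes along the first segment found by pvSpan
lemma gapsN_decomp (t : Int) : ∀ (rest : List Int) (l0 : Int),
    pvGapsN t 0 (l0 :: rest) =
      if pvSpan t l0 rest = rest.length then []
      else (pvSpan t l0 rest + 1)
        :: (pvGapsN t 0 ((l0 :: rest).drop (pvSpan t l0 rest + 1))).map (· + (pvSpan t l0 rest + 1)) := by
  intro rest
  induction rest with
  | nil => intro l0; simp [pvGapsN, pvSpan]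
  | cons x xs ih =>
    intro l0
    by_cases hle : x - l0 ≤ t
    · have hspan : pvSpan t l0 (x :: xs) = pvSpan t x xs + 1 := by
        rw [show pvSpan t l0 (x :: xs) = if x - l0 ≤ t then pvSpan t x xs + 1 else 0 from rfl,
          if_pos hle]
      have hng : ¬ (x - l0 > t) := by omega
      have hstep : pvGapsN t 0 (l0 :: x :: xs) = (pvGapsN t 0 (x :: xs)).map (· + 1) := by
        simp only [pvGapsN, if_neg hng]
        exact gapsN_shift t (x :: xs) 1
      rw [hstep, ih x, hspan]
      by_cases hend : pvSpan t x xs = xs.length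
      · rw [if_pos hend, if_pos (by simp [hend])]
        simp
      · rw [if_neg hend, if_neg (by simp only [List.length_cons]; omega)]
        simp only [List.map_cons, List.map_map]
        congr 1
    · have hspan : pvSpan t l0 (x :: xs) = 0 := by
        rw [show pvSpan t l0 (x :: xs) = if x - l0 ≤ t then pvSpan t x xs + 1 else 0 from rfl,
          if_neg hle]
      have hg : x - l0 > t := by omega
      rw [hspan, if_neg (by simp)]
      simp only [pvGapsN, if_pos hg]
      rw [gapsN_shift t (x :: xs) 1]
      rfl

-- the prefix-sum foldl is 0 :: running sums
lemma foldl_scan : ∀ (l acc : List Int), acc ≠ [] →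
    l.foldl (fun p x => p ++ [p.getLast! + x]) acc = acc ++ pvScan acc.getLast! l := by
  intro l
  induction l with
  | nil => intro acc _; simp [pvScan]
  | cons x xs ih =>
    intro acc hacc
    simp only [List.foldl_cons]
    rw [ih (acc ++ [acc.getLast! + x]) (by simp)]
    have hlast : (acc ++ [acc.getLast! + x]).getLast! = acc.getLast! + x := by simp
    rw [hlast]
    simp [pvScan]

lemma scan_getD : ∀ (l : List Int) (s : Int) (k : Nat), k < l.length →
    (pvScan s l).getD k 0 = s + (l.take (k + 1)).sum := by
  intro l
  induction l with
  | nil => intro s k h; simp at h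
  | cons x xs ih =>
    intro s k h
    cases k with
    | zero => simp [pvScan]
    | succ j =>
      have hj : j < xs.length := by simp at h; omega
      simp only [pvScan, List.getD_cons_succ]
      rw [ih (s + x) j hj]
      simp [List.take_succ_cons]
      ring

lemma prefix_getD (l : List Int) (k : Nat) (hk : k ≤ l.length) :
    (l.foldl (fun p x => p ++ [p.getLast! + x]) [0]).getD k 0 = (l.take k).sum := by
  rw [foldl_scan l [0] (by simp)]
  have : ([(0 : Int)]).getLast! = 0 := by simp
  rw [this]
  cases k with
  | zero => simp
  | succ j =>
    have hj : j < l.length := by omega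
    simp only [List.singleton_append, List.getD_cons_succ]
    rw [scan_getD l 0 j hj]
    simp

-- zip of a mapped list with its mapped tail is the mapped zip of list and tail
lemma pvZipMapTail (f : Nat → Nat) : ∀ (M : List Nat) (x : Nat),
    ((f x :: M.map f).zip (M.map f)) = ((x :: M).zip M).map (Prod.map f f) := by
  intro M
  induction M with
  | nil => intro x; simp
  | cons m M' ih =>
    intro x
    simp only [List.map_cons, List.zip_cons_cons]
    rw [ih m]
    simp

-- the port of B equals the Nat-level pvCenters on nonempty input
lemma alt_eq_centers (l : List Int) (t : Int) (hne : l ≠ []) :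
    cluster_lines_py_alt l t = pvCenters t l := by
  obtain ⟨l0, rest, rfl⟩ := List.exists_cons_of_ne_nil hne
  unfold cluster_lines_py_alt
  rw [if_neg (by simp)]
  simp only [PySem.List.slice_from_one, List.tail_cons]
  have hg := gaps_bridge t rest l0 0
  simp only [Nat.cast_zero] at hg
  rw [hg]
  have hb : (0 : Int) :: ((pvGapsN t 0 (l0 :: rest)).map (fun j : Nat => (j : Int)) ++ [((l0 :: rest).length : Int)])
      = ((0 :: (pvGapsN t 0 (l0 :: rest) ++ [(l0 :: rest).length])).map (fun j : Nat => (j : Int))) := by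
    simp
  have h2 : (pvGapsN t 0 (l0 :: rest)).map (fun j : Nat => (j : Int)) ++ [((l0 :: rest).length : Int)]
      = ((pvGapsN t 0 (l0 :: rest) ++ [(l0 :: rest).length])).map (fun j : Nat => (j : Int)) := by
    simp
  rw [hb, h2, List.zip_map, List.map_map]
  unfold pvCenters
  apply List.map_congr_left
  intro ab hab
  obtain ⟨a, b⟩ := ab
  obtain ⟨ha, hb'⟩ := List.of_mem_zip hab
  have hmem : ∀ j ∈ (0 :: (pvGapsN t 0 (l0 :: rest) ++ [(l0 :: rest).length])), j ≤ (l0 :: rest).length := by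
    intro j hj
    simp only [List.mem_cons, List.mem_append, List.not_mem_nil,
      or_false] at hj
    rcases hj with rfl | hj | rfl
    · omega
    · have := gapsN_mem_le t (l0 :: rest) 0 j hj; omega
    · omega
  have hA : a ≤ (l0 :: rest).length := hmem a ha
  have hB2 : b ≤ (l0 :: rest).length := hmem b (List.mem_cons_of_mem _ hb')
  simp only [Function.comp_apply, Prod.map_apply]
  rw [PySem.List.pyGetD_natCast, PySem.List.pyGetD_natCast]
  rw [prefix_getD _ _ hB2, prefix_getD _ _ hA]

-- pvCenters equals the segment recursion
lemma centers_eq_segRec (n : Nat) : ∀ (l : List Int) (t : Int), l.length ≤ n → l ≠ [] →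
    pvCenters t l = pvSegRec l t := by
  induction n with
  | zero => intro l t hl hne; cases l with
    | nil => exact absurd rfl hne
    | cons a b => simp at hl
  | succ m ih =>
    intro l t hl hne
    obtain ⟨l0, rest, rfl⟩ := List.exists_cons_of_ne_nil hne
    set s := pvSpan t l0 rest with hs
    have hsle : s ≤ rest.length := pvSpan_le t rest l0
    rw [pvSegRec]
    by_cases hend : s = rest.length
    · -- single segment: drop is empty
      have hG : pvGapsN t 0 (l0 :: rest) = [] := by
        rw [gapsN_decomp t rest l0, if_pos (by rw [← hs]; exact hend)]
      have hi : s + 1 = (l0 :: rest).length := by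
        simp only [List.length_cons]; omega
      have hdrop : (l0 :: rest).drop (s + 1) = [] := by
        rw [hi]; simp
      rw [← hs, hdrop, pvSegRec]
      unfold pvCenters
      rw [hG]
      simp only [List.nil_append, List.zip_cons_cons, List.zip_nil_right, List.map_cons, List.map_nil]
      congr 1
      rw [← hi]
      simp
    · -- first segment then the rest
      have hslt : s < rest.length := by omega
      have hd : (l0 :: rest).drop (s + 1) ≠ [] := by
        have hlen' : ((l0 :: rest).drop (s + 1)).length = rest.length - s := by
          simp only [List.length_drop, List.length_cons]; omega
        intro hcon; rw [hcon] at hlen'; simp at hlen'; omega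
      set d := (l0 :: rest).drop (s + 1) with hdd
      have hdl : d.length = rest.length - s := by
        rw [hdd]; simp only [List.length_drop, List.length_cons]; omega
      have hlen : (l0 :: rest).length = (s + 1) + d.length := by
        simp only [List.length_cons]; omega
      have hG : pvGapsN t 0 (l0 :: rest) = (s + 1) :: (pvGapsN t 0 d).map (· + (s + 1)) := by
        rw [gapsN_decomp t rest l0, ← hs, if_neg hend, ← hdd]
      have hBl : (pvGapsN t 0 (l0 :: rest) ++ [(l0 :: rest).length])
          = (0 :: (pvGapsN t 0 d ++ [d.length])).map (· + (s + 1)) := by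
        rw [hG, hlen]
        simp [Nat.add_comm]
      unfold pvCenters
      rw [hBl]
      set Bd : List Nat := 0 :: (pvGapsN t 0 d ++ [d.length]) with hBd
      have hBdne : Bd ≠ [] := by rw [hBd]; simp
      obtain ⟨b0, Bd', hBdeq⟩ := List.exists_cons_of_ne_nil hBdne
      have hb0 : b0 = 0 := by
        rw [hBd] at hBdeq; injection hBdeq with h1 _; omega
      have hzip : ((0 : Nat) :: Bd.map (· + (s + 1))).zip (Bd.map (· + (s + 1)))
          = (0, b0 + (s + 1)) :: (Bd.zip Bd.tail).map (Prod.map (· + (s + 1)) (· + (s + 1))) := by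
        rw [hBdeq, List.map_cons, List.zip_cons_cons, List.tail_cons,
          show (((b0 + (s + 1)) :: Bd'.map (· + (s + 1))).zip (Bd'.map (· + (s + 1))))
              = ((b0 :: Bd').zip Bd').map (Prod.map (· + (s + 1)) (· + (s + 1)))
            from pvZipMapTail (fun x => x + (s + 1)) Bd' b0]
      rw [hzip, List.map_cons]
      congr 1
      · -- head element
        rw [hb0]
        simp
        rw [← hs]
      · -- tail: reduce to pvCenters of d, then the induction hypothesis
        have hIH : pvCenters t d = pvSegRec d t := by
          apply ih d t _ hd
          simp only [List.length_cons] at hl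
          omega
        rw [List.map_map]
        have htake : ∀ k : Nat, ((l0 :: rest).take (k + (s + 1))).sum
            = ((l0 :: rest).take (s + 1)).sum + (d.take k).sum := by
          intro k
          rw [Nat.add_comm k (s + 1), List.take_add]
          rw [List.sum_append, ← hdd]
        have hpt : ∀ ab ∈ Bd.zip Bd.tail,
            ((fun ab : Nat × Nat => PySem.Int.floordiv (((l0 :: rest).take ab.2).sum - ((l0 :: rest).take ab.1).sum) ((ab.2 : Int) - (ab.1 : Int))) ∘ Prod.map (· + (s + 1)) (· + (s + 1))) ab
              = (fun ab : Nat × Nat => PySem.Int.floordiv ((d.take ab.2).sum - (d.take ab.1).sum) ((ab.2 : Int) - (ab.1 : Int))) ab := by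
          rintro ⟨a, b⟩ -
          simp only [Function.comp_apply, Prod.map_apply]
          rw [htake a, htake b]
          have hc2 : ((b + (s + 1) : Nat) : Int) - ((a + (s + 1) : Nat) : Int) = (b : Int) - (a : Int) := by
            push_cast; ring
          rw [hc2]
          congr 1
          ring
        rw [List.map_congr_left hpt]
        rw [show Bd.zip Bd.tail
            = ((0 :: (pvGapsN t 0 d ++ [d.length])).zip (pvGapsN t 0 d ++ [d.length]))
          from by rw [hBd, List.tail_cons]]
        exact hIH

-- ===== VERDICT (by name: the statement is the Claim_ definition above) =====
theorem cluster_lines_py_spec : Claim_equal_cluster_lines_py := by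
  intro lines tol _
  unfold Spec_cluster_lines_py
  cases hL : lines with
  | nil => rfl
  | cons l0 rest =>
    rw [a_eq_segRec, alt_eq_centers _ _ (by simp),
      centers_eq_segRec (l0 :: rest).length _ tol le_rfl (by simp)]
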